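-- pv_equiv track=rewrite | github.com/benquick123/code-profiling | code/batch-1/dn6/M-105.py | zberi_se_zacne_z
-- ===== SOURCE A (Python) =====
-- def unikati(s):
--     container = []
--     for i in s:
--         if i not in container:
--             container.append(i)
--     return container
--
-- def izloci_besedo(beseda):
--     container = list(beseda)
--     i = 0
--     while not container[0].isalnum():
--         del(container[0])
--
--     while not container[-1].isalnum():
--         del (container[-1])
--
--     return "".join(container)
--
-- def se_zacne_z(tvit, c):
--     co = tvit.split(" ")
--     while '' in co:
--         co.remove('')
--     uni = unikati(co)
--     container = []
--     izlocene = []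
--     for i in uni:
--         if i[0] == c:
--             container.append(i)
--     for i in container:
--         izlocene.append(izloci_besedo(i))
--     return izlocene
--
-- def zberi_se_zacne_z(tviti, c):
--     container = []
--     z = []
--     s = ""
--     for i in tviti:
--         s += " " + i
--     container = (se_zacne_z(s, c))
--     container = unikati(container)
--     return container
-- ===== SOURCE B (Python) =====
-- def _obrezi(beseda):
--     chars = list(beseda)
--     while chars and not chars[0].isalnum():
--         chars.pop(0)
--     while chars and not chars[-1].isalnum():
--         chars.pop()
--     return "".join(chars)
--
--
-- def zberi_se_zacne_z(tviti, c):
--     seen_raw = set()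
--     seen_stripped = set()
--     out = []
--     for tvit in tviti:
--         for beseda in tvit.split(" "):
--             if beseda != "" and beseda[0] == c and beseda not in seen_raw:
--                 seen_raw.add(beseda)
--                 jedro = _obrezi(beseda)
--                 if jedro not in seen_stripped:
--                     seen_stripped.add(jedro)
--                     out.append(jedro)
--     return out
-- ===== Notes on version B (the rewrite author's own statement) =====
-- stated objective: alternative
-- what changed: A joins all tweets into one string, splits it, and then runs four more full-list passes (remove empty strings, dedup, filter by first char, strip-map) plus a final dedup; B never builds the joined string and instead makes one fused pass over the tweets' words, maintaining a seen-raw set, a seen-stripped set and the output list.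
import Mathlib
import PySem

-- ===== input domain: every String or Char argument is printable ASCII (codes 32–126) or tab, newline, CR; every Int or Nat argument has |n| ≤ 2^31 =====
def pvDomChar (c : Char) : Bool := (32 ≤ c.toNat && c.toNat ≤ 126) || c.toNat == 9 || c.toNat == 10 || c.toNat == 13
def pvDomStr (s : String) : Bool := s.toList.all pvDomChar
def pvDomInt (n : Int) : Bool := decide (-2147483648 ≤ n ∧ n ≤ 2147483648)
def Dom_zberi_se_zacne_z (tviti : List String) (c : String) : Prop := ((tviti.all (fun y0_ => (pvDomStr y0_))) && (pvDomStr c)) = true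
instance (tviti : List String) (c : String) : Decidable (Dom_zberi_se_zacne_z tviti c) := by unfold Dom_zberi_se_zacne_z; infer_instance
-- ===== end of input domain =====

-- B replaces A's join-everything-then-five-full-list-passes pipeline (join, remove-empties,
-- dedup, filter, strip-map, dedup) by ONE fused traversal of the tweets with two seen-sets;
-- objective: alternative decomposition (same asymptotic cost up to the list-membership scans).

-- ===== PORT A =====
-- unikati(s): dedup keeping first occurrences, by the hand-written loop
def unikati (s : List String) : List String :=
  s.foldl (fun container i => if container.contains i then container else container ++ [i]) []

-- 'while not container[0].isalnum(): del(container[0])' — none = IndexError on the empty list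
def delFront : List Char → Option (List Char)
  | [] => none
  | x :: xs => if !(PySem.Chars.isalnum x) then delFront xs else some (x :: xs)

def izloci_besedo (beseda : String) : Option String :=
  match delFront beseda.toList with
  | none => none
  | some l1 =>
    -- 'while not container[-1].isalnum(): del(container[-1])' — the same loop on the reversed list
    match delFront l1.reverse with
    | none => none
    | some l2 => some (String.ofList l2.reverse)

-- i[0] == c  (i[0] raises on i = ""; both Pythons only evaluate it on nonempty i, so the
-- none branch is unreachable there and its value is irrelevant)
def headEq (i c : String) : Bool :=
  match PySem.Str.pyGet? i 0 with
  | some ch => String.ofList [ch] == c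
  | none => false

-- "while '' in co: co.remove('')" removes every '' keeping the order of the rest
def removeBlanks : List String → List String
  | [] => []
  | x :: xs => if x == "" then removeBlanks xs else x :: removeBlanks xs

def se_zacne_z (tvit : String) (c : String) : List String :=
  let co := (PySem.Str.split? tvit " ").getD []   -- sep " " ≠ "", so split? is always some
  let co := removeBlanks co
  let uni := unikati co
  let container := uni.foldl (fun acc i => if headEq i c then acc ++ [i] else acc) []
  -- izloci_besedo = none is Python's IndexError: those inputs are excluded by Pre_ below
  container.foldl (fun izlocene i => izlocene ++ [(izloci_besedo i).getD ""]) []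

def zberi_se_zacne_z (tviti : List String) (c : String) : List String :=
  -- s += " " + i, on code points (Lean's String.append is kernel-opaque)
  let s := tviti.foldl (fun s i => s ++ ' ' :: i.toList) ([] : List Char)
  unikati (se_zacne_z (String.ofList s) c)

-- ===== PORT B =====
-- _obrezi: pop non-alnum chars from the front, then from the back (of the reversed list)
def obrezi (beseda : String) : String :=
  let chars := beseda.toList.dropWhile (fun ch => !(PySem.Chars.isalnum ch))
  let chars := (chars.reverse.dropWhile (fun ch => !(PySem.Chars.isalnum ch))).reverse
  String.ofList chars

-- the body of B's fused loop: state = (seen_raw, seen_stripped, out)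
def altStep (c : String) (st : PySem.Set String × PySem.Set String × List String)
    (beseda : String) : PySem.Set String × PySem.Set String × List String :=
  if !(beseda == "") && headEq beseda c && !(st.1.contains beseda) then
    let sr := PySem.Set.add st.1 beseda
    let jedro := obrezi beseda
    if st.2.1.contains jedro then (sr, st.2.1, st.2.2)
    else (sr, PySem.Set.add st.2.1 jedro, st.2.2 ++ [jedro])
  else st

def zberi_se_zacne_z_alt (tviti : List String) (c : String) : List String :=
  let fin := tviti.foldl
    (fun st tvit => ((PySem.Str.split? tvit " ").getD []).foldl (altStep c) st)
    (PySem.Set.empty, PySem.Set.empty, ([] : List String))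
  fin.2.2

-- ===== PRECONDITION & SPEC =====
-- Pre_ excludes exactly the inputs on which A raises IndexError: some space-separated word
-- starts with c but consists entirely of non-alphanumeric characters, so izloci_besedo
-- deletes every character and then indexes the empty list.
def Pre_zberi_se_zacne_z (tviti : List String) (c : String) : Prop :=
  ∀ t ∈ tviti, ∀ w ∈ (PySem.Str.split? t " ").getD [],
    w.toList ≠ [] → w.toList.take 1 = c.toList → w.toList.any PySem.Chars.isalnum = true
instance (tviti : List String) (c : String) : Decidable (Pre_zberi_se_zacne_z tviti c) := by
  unfold Pre_zberi_se_zacne_z; infer_instance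

def pvWitness_zberi_se_zacne_z : List String × String := (["#hej svet! #hej ..ab", "x #hej, svet"], "#")

def Spec_zberi_se_zacne_z (tviti : List String) (c : String) (out : List String) : Prop := out = zberi_se_zacne_z_alt tviti c
instance (tviti : List String) (c : String) (out : List String) : Decidable (Spec_zberi_se_zacne_z tviti c out) := by unfold Spec_zberi_se_zacne_z; infer_instance

-- ===== CLAIM (what is proved, stated in full; the proofs are below) =====
def Claim_equal_zberi_se_zacne_z : Prop := ∀ (tviti : List String) (c : String), Dom_zberi_se_zacne_z tviti c → Pre_zberi_se_zacne_z tviti c → Spec_zberi_se_zacne_z tviti c (zberi_se_zacne_z tviti c)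

-- ===== LEMMAS AND PROOFS =====

-- ---- strings ----
lemma str_eq_empty_iff (w : String) : (w == "") = true ↔ w.toList = [] := by
  constructor
  · intro h
    have : w = "" := by simpa using h
    simp [this]
  · intro h
    have : w = "" := by
      have := congrArg String.ofList h
      simpa [String.ofList_toList] using this
    simp [this]

lemma headEq_iff (w c : String) (hw : w.toList ≠ []) :
    headEq w c = true ↔ w.toList.take 1 = c.toList := by
  unfold headEq
  cases hl : w.toList with
  | nil => exact absurd hl hw
  | cons ch rest =>
    have hget : PySem.Str.pyGet? w 0 = some ch := by
      simp [PySem.Str.pyGet?, PySem.Chars.pyGet?_eq_listPyGet?, PySem.List.pyGet?,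
        PySem.List.pyIdx?, hl]
    rw [hget]
    simp only [List.take, beq_iff_eq]
    constructor
    · intro h; rw [← h, String.toList_ofList]
    · intro h
      have := congrArg String.ofList h
      simpa [String.ofList_toList] using this

-- ---- splitOn bridge ----
lemma go_single (c0 : Char) : ∀ (fuel : Nat) (l cur : List Char) (acc : List (List Char)),
    l.length ≤ fuel →
    PySem.Chars.splitOn.go [c0] fuel l cur acc
      = acc.reverse ++ (List.splitOnP (· == c0) l).modifyHead (fun t => cur.reverse ++ t) := by
  intro fuel
  induction fuel with
  | zero =>
    intro l cur acc h
    have hl : l = [] := List.length_eq_zero_iff.1 (Nat.le_zero.1 h)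
    subst hl
    simp [PySem.Chars.splitOn.go, List.splitOnP_nil]
  | succ fuel ih =>
    intro l cur acc h
    cases l with
    | nil => simp [PySem.Chars.splitOn.go, List.splitOnP_nil]
    | cons ch rest =>
      have hlen : rest.length ≤ fuel := by simpa using h
      by_cases hc : ch = c0
      · subst hc
        have hpre : List.isPrefixOf [ch] (ch :: rest) = true := by
          simp [List.isPrefixOf]
        rw [show PySem.Chars.splitOn.go [ch] (fuel + 1) (ch :: rest) cur acc
              = PySem.Chars.splitOn.go [ch] fuel (List.drop 1 (ch :: rest)) [] (cur.reverse :: acc) by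
            simp [PySem.Chars.splitOn.go, hpre]]
        rw [ih _ [] _ (by simpa using hlen)]
        have hne := List.splitOnP_ne_nil (· == ch) rest
        obtain ⟨hd, tl, he⟩ := List.exists_cons_of_ne_nil hne
        simp [List.splitOnP_cons, he]
      · have hpre : List.isPrefixOf [c0] (ch :: rest) = false := by
          simp [List.isPrefixOf]; exact fun hcc => absurd hcc.symm hc
        rw [show PySem.Chars.splitOn.go [c0] (fuel + 1) (ch :: rest) cur acc
              = PySem.Chars.splitOn.go [c0] fuel rest (ch :: cur) acc by
            simp [PySem.Chars.splitOn.go, hpre]]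
        rw [ih _ _ _ hlen]
        have hne := List.splitOnP_ne_nil (· == c0) rest
        obtain ⟨hd, tl, he⟩ := List.exists_cons_of_ne_nil hne
        simp [List.splitOnP_cons, hc, he]

lemma splitOn_single (s : List Char) (c0 : Char) :
    PySem.Chars.splitOn s [c0] = List.splitOnP (· == c0) s := by
  unfold PySem.Chars.splitOn
  rw [go_single c0 (s.length + 1) s [] [] (by omega)]
  have hne := List.splitOnP_ne_nil (· == c0) s
  obtain ⟨hd, tl, he⟩ := List.exists_cons_of_ne_nil hne
  simp [he]

lemma splitOnP_sep {p : Char → Bool} {a : Char} (h : p a = true) (x y : List Char) :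
    List.splitOnP p (x ++ a :: y) = List.splitOnP p x ++ List.splitOnP p y := by
  induction x with
  | nil => simp [List.splitOnP_cons, h, List.splitOnP_nil]
  | cons b x' ih =>
    by_cases hb : p b = true
    · simp [List.splitOnP_cons, hb, ih]
    · rw [show (b :: x') ++ a :: y = b :: (x' ++ a :: y) from rfl]
      rw [List.splitOnP_cons, List.splitOnP_cons, if_neg hb, if_neg hb, ih]
      obtain ⟨hd', tl', he'⟩ := List.exists_cons_of_ne_nil (List.splitOnP_ne_nil p x')
      rw [he']
      simp

lemma splitOnP_joined (tviti : List String) :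
    List.splitOnP (· == ' ') (tviti.foldl (fun s i => s ++ ' ' :: i.toList) ([] : List Char))
      = [] :: tviti.flatMap (fun t => List.splitOnP (· == ' ') t.toList) := by
  induction tviti using List.reverseRecOn with
  | nil => simp [List.splitOnP_nil]
  | append_singleton ts t ih =>
    rw [List.foldl_append]
    simp only [List.foldl_cons, List.foldl_nil]
    rw [splitOnP_sep (by simp) _ _, ih]
    simp

def wordsOf (t : String) : List String := (PySem.Str.split? t " ").getD []

lemma wordsOf_eq (t : String) :
    wordsOf t = (List.splitOnP (· == ' ') t.toList).map String.ofList := by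
  simp [wordsOf, PySem.Str.split?, PySem.Chars.split?, show (" " : String).toList = [' '] from rfl,
    splitOn_single]

-- A's word list is "" followed by the per-tweet word lists
lemma co_eq (tviti : List String) :
    (PySem.Str.split?
        (String.ofList (tviti.foldl (fun s i => s ++ ' ' :: i.toList) ([] : List Char))) " ").getD []
      = "" :: tviti.flatMap wordsOf := by
  unfold PySem.Str.split? PySem.Chars.split?
  rw [if_neg (by decide), String.toList_ofList, show (" " : String).toList = [' '] from rfl,
    splitOn_single, splitOnP_joined]
  rw [show wordsOf = (fun t : String => (List.splitOnP (· == ' ') t.toList).map String.ofList)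
      from funext (fun t => wordsOf_eq t)]
  simp [List.map_flatMap, show String.ofList [] = "" from rfl]

-- ---- small pass lemmas ----
lemma removeBlanks_eq_filter (l : List String) :
    removeBlanks l = l.filter (fun w => !(w == "")) := by
  induction l with
  | nil => rfl
  | cons x xs ih => by_cases h : x = "" <;> simp [removeBlanks, h, ih]

lemma unikati_eq (l : List String) : unikati l = PySem.Set.ofList l := rfl

lemma ofList_concat (U : List String) (w : String) :
    PySem.Set.ofList (U ++ [w])
      = if w ∈ U then PySem.Set.ofList U else PySem.Set.ofList U ++ [w] := by
  have : PySem.Set.ofList (U ++ [w]) = PySem.Set.add (PySem.Set.ofList U) w := by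
    simp [PySem.Set.ofList, List.foldl_append]
  rw [this, PySem.Set.add]
  by_cases h : w ∈ U
  · simp [h, (PySem.Set.mem_ofList U w).2 h]
  · have : w ∉ PySem.Set.ofList U := fun hc => h ((PySem.Set.mem_ofList U w).1 hc)
    simp [h, this]

-- ---- strip ----
lemma delFront_eq (l : List Char) (h : l.any PySem.Chars.isalnum = true) :
    delFront l = some (l.dropWhile (fun ch => !(PySem.Chars.isalnum ch))) := by
  induction l with
  | nil => simp at h
  | cons x xs ih =>
    by_cases hx : PySem.Chars.isalnum x = true
    · simp [delFront, hx]
    · have hx' : PySem.Chars.isalnum x = false := by simpa using hx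
      have : xs.any PySem.Chars.isalnum = true := by simpa [hx'] using h
      simp [delFront, hx', ih this]

lemma any_dropWhile (l : List Char) (h : l.any PySem.Chars.isalnum = true) :
    (l.dropWhile (fun ch => !(PySem.Chars.isalnum ch))).any PySem.Chars.isalnum = true := by
  induction l with
  | nil => simp at h
  | cons x xs ih =>
    by_cases hx : PySem.Chars.isalnum x = true
    · simp [hx]
    · have hx' : PySem.Chars.isalnum x = false := by simpa using hx
      have : xs.any PySem.Chars.isalnum = true := by simpa [hx'] using h
      simp [hx', ih this]

lemma izloci_eq (w : String) (h : w.toList.any PySem.Chars.isalnum = true) :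
    izloci_besedo w = some (obrezi w) := by
  have h1 := delFront_eq w.toList h
  have h2 : ((w.toList.dropWhile (fun ch => !(PySem.Chars.isalnum ch))).reverse).any
      PySem.Chars.isalnum = true := by
    rw [List.any_reverse]; exact any_dropWhile _ h
  have h3 := delFront_eq _ h2
  simp [izloci_besedo, h1, h3, obrezi]

-- ---- the fused loop vs the staged passes ----
def okW (c : String) (w : String) : Bool := !(w == "") && headEq w c

def pipeA (c : String) (W : List String) : List String :=
  PySem.Set.ofList
    (((PySem.Set.ofList (W.filter (fun w => !(w == "")))).filter (fun w => headEq w c)).map obrezi)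

lemma mem_filterP {W : List String} {w : String} (hok : okW c w = true) :
    w ∈ W.filter (fun w => !(w == "")) ↔ w ∈ W.filter (okW c) := by
  constructor
  · intro h; exact List.mem_filter.2 ⟨(List.mem_filter.1 h).1, hok⟩
  · intro h
    have h' := hok
    simp only [okW, Bool.and_eq_true] at h'
    exact List.mem_filter.2 ⟨(List.mem_filter.1 h).1, h'.1⟩

lemma contains_ofList (l : List String) (w : String) :
    (PySem.Set.ofList l).contains w = decide (w ∈ l) := by
  by_cases h : w ∈ l
  · simp [List.contains_eq_mem, (PySem.Set.mem_ofList l w).2 h, h]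
  · have : w ∉ PySem.Set.ofList l := fun hc => h ((PySem.Set.mem_ofList l w).1 hc)
    simp [List.contains_eq_mem, this, h]

lemma pipeA_snoc_blank (c : String) (W : List String) (w : String) (hw0 : (w == "") = true) :
    pipeA c (W ++ [w]) = pipeA c W := by
  simp [pipeA, List.filter_append, hw0]

lemma pipeA_snoc_mem (c : String) (W : List String) (w : String)
    (hmem : w ∈ W.filter (fun x => !(x == ""))) :
    pipeA c (W ++ [w]) = pipeA c W := by
  by_cases hw0 : (w == "") = true
  · exact pipeA_snoc_blank c W w hw0
  · unfold pipeA
    rw [List.filter_append, show List.filter (fun x => !(x == "")) [w] = [w] by simp [hw0],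
      ofList_concat, if_pos hmem]

lemma pipeA_snoc_nohead (c : String) (W : List String) (w : String)
    (hhd : headEq w c = false) :
    pipeA c (W ++ [w]) = pipeA c W := by
  by_cases hw0 : (w == "") = true
  · exact pipeA_snoc_blank c W w hw0
  · by_cases hmem : w ∈ W.filter (fun x => !(x == ""))
    · exact pipeA_snoc_mem c W w hmem
    · unfold pipeA
      rw [List.filter_append, show List.filter (fun x => !(x == "")) [w] = [w] by simp [hw0],
        ofList_concat, if_neg hmem, List.filter_append, show List.filter (fun x => headEq x c) [w]
          = [] by simp [hhd]]
      simp

lemma pipeA_snoc_new (c : String) (W : List String) (w : String) (hw0 : (w == "") = false)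
    (hhd : headEq w c = true) (hmem : w ∉ W.filter (fun x => !(x == ""))) :
    pipeA c (W ++ [w])
      = if obrezi w ∈ pipeA c W then pipeA c W else pipeA c W ++ [obrezi w] := by
  unfold pipeA
  rw [List.filter_append, show List.filter (fun x => !(x == "")) [w] = [w] by simp [hw0],
    ofList_concat, if_neg hmem, List.filter_append, show List.filter (fun x => headEq x c) [w]
      = [w] by simp [hhd], List.map_append, List.map_singleton, ofList_concat]
  have hiff : obrezi w ∈ ((PySem.Set.ofList (W.filter (fun x => !(x == "")))).filter
      (fun x => headEq x c)).map obrezi ↔ obrezi w ∈ PySem.Set.ofList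
        (((PySem.Set.ofList (W.filter (fun x => !(x == "")))).filter
          (fun x => headEq x c)).map obrezi) := (PySem.Set.mem_ofList _ _).symm
  by_cases h : obrezi w ∈ ((PySem.Set.ofList (W.filter (fun x => !(x == "")))).filter
      (fun x => headEq x c)).map obrezi
  · rw [if_pos h, if_pos (hiff.1 h)]
  · rw [if_neg h, if_neg (fun hc => h (hiff.2 hc))]

lemma foldB_char (c : String) (W : List String) :
    W.foldl (altStep c) (PySem.Set.empty, PySem.Set.empty, ([] : List String))
      = (PySem.Set.ofList (W.filter (okW c)), pipeA c W, pipeA c W) := by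
  induction W using List.reverseRecOn with
  | nil => rfl
  | append_singleton W w ih =>
    rw [List.foldl_append, ih]
    simp only [List.foldl_cons, List.foldl_nil]
    by_cases hw0 : (w == "") = true
    · have hok : okW c w = false := by simp [okW, hw0]
      rw [show (W ++ [w]).filter (okW c) = W.filter (okW c) by simp [List.filter_append, hok],
        pipeA_snoc_blank c W w hw0]
      simp [altStep, hw0]
    · have hw0' : (w == "") = false := by simpa using hw0
      by_cases hhd : headEq w c = true
      · have hok : okW c w = true := by simp [okW, hw0', hhd]
        by_cases hmem : w ∈ W.filter (fun x => !(x == ""))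
        · have hmemOk : w ∈ W.filter (okW c) := (mem_filterP hok).1 hmem
          rw [show (W ++ [w]).filter (okW c) = W.filter (okW c) ++ [w] by
              simp [List.filter_append, hok],
            ofList_concat, if_pos hmemOk, pipeA_snoc_mem c W w hmem]
          simp [altStep, hw0', hhd, hmemOk]
        · have hmemOk : w ∉ W.filter (okW c) := fun hc => hmem ((mem_filterP hok).2 hc)
          rw [show (W ++ [w]).filter (okW c) = W.filter (okW c) ++ [w] by
              simp [List.filter_append, hok],
            ofList_concat, if_neg hmemOk, pipeA_snoc_new c W w hw0' hhd hmem]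
          have hadd : PySem.Set.add (PySem.Set.ofList (W.filter (okW c))) w
              = PySem.Set.ofList (W.filter (okW c)) ++ [w] := by
            rw [PySem.Set.add, contains_ofList, if_neg (by simp [hmemOk])]
          by_cases hj : obrezi w ∈ pipeA c W
          · simp [altStep, hw0', hhd, hmemOk, List.contains_eq_mem, hj]
          · simp [altStep, hw0', hhd, hmemOk, List.contains_eq_mem, hj]
      · have hhd' : headEq w c = false := by simpa using hhd
        have hok : okW c w = false := by simp [okW, hhd']
        rw [show (W ++ [w]).filter (okW c) = W.filter (okW c) by simp [List.filter_append, hok],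
          pipeA_snoc_nohead c W w hhd']
        simp [altStep, hhd']

lemma foldl_filter_headEq (c : String) (l acc : List String) :
    l.foldl (fun acc i => if headEq i c then acc ++ [i] else acc) acc
      = acc ++ l.filter (fun i => headEq i c) := by
  have := PySem.List.foldl_append_if (fun i => headEq i c) id l acc
  simpa using this

lemma alt_eq_pipeA (tviti : List String) (c : String) :
    zberi_se_zacne_z_alt tviti c = pipeA c (tviti.flatMap wordsOf) := by
  unfold zberi_se_zacne_z_alt
  rw [show (fun st tvit => ((PySem.Str.split? tvit " ").getD []).foldl (altStep c) st)
      = (fun (st : PySem.Set String × PySem.Set String × List String) tvit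
          => (wordsOf tvit).foldl (altStep c) st) from rfl]
  rw [← List.foldl_flatMap, foldB_char]

lemma a_eq_pipeA (tviti : List String) (c : String) (hpre : Pre_zberi_se_zacne_z tviti c) :
    zberi_se_zacne_z tviti c = pipeA c (tviti.flatMap wordsOf) := by
  simp only [zberi_se_zacne_z, se_zacne_z]
  rw [co_eq, removeBlanks_eq_filter]
  simp only [unikati_eq]
  rw [show List.filter (fun w => !(w == "")) ("" :: tviti.flatMap wordsOf)
      = (tviti.flatMap wordsOf).filter (fun w => !(w == "")) by simp]
  rw [foldl_filter_headEq, List.nil_append,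
    PySem.List.foldl_append_singleton_eq_map (fun i => (izloci_besedo i).getD ""), List.nil_append]
  have hmap : (((PySem.Set.ofList ((tviti.flatMap wordsOf).filter (fun w => !(w == "")))).filter
        (fun i => headEq i c)).map (fun i => (izloci_besedo i).getD ""))
      = (((PySem.Set.ofList ((tviti.flatMap wordsOf).filter (fun w => !(w == "")))).filter
        (fun i => headEq i c)).map obrezi) := by
    apply List.map_congr_left
    intro w hwmem
    have h1 := List.mem_filter.1 hwmem
    have hhd : headEq w c = true := h1.2
    have h2 := List.mem_filter.1 ((PySem.Set.mem_ofList _ _).1 h1.1)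
    have hw0 : (w == "") = false := by simpa using h2.2
    have hwl : w.toList ≠ [] := fun hc => by
      rw [(str_eq_empty_iff w).2 hc] at hw0; simp at hw0
    obtain ⟨t, ht, hwt⟩ := List.mem_flatMap.1 h2.1
    have hal : w.toList.any PySem.Chars.isalnum = true :=
      hpre t ht w hwt hwl ((headEq_iff w c hwl).1 hhd)
    rw [izloci_eq w hal, Option.getD_some]
  rw [hmap]
  rfl

-- ===== VERDICT (by name: the statement is the Claim_ definition above) =====
theorem zberi_se_zacne_z_spec : Claim_equal_zberi_se_zacne_z := by
  intro tviti c _ hpre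
  unfold Spec_zberi_se_zacne_z
  rw [a_eq_pipeA tviti c hpre, alt_eq_pipeA]
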